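-- pv_equiv track=rewrite | github.com/a-mroz/adventofcode2020 | Day21.py | non_allergic_ingredients
-- ===== SOURCE A (Python) =====
-- def non_allergic_ingredients(food_with_alergens, all_allergens, all_ingredients):
--     allergic_ingredients = {}
--
--     for allergen in all_allergens:
--         candidates = set(all_ingredients)
--
--         for ingredients, allergens in food_with_alergens:
--             if allergen in allergens:
--                 candidates &= ingredients
--
--         allergic_ingredients[allergen] = candidates
--
--     non_alergic_ingredients = set(all_ingredients)
--     for _, ingredients in allergic_ingredients.items():
--         non_alergic_ingredients -= ingredients
--
--     return non_alergic_ingredients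
-- ===== SOURCE B (Python) =====
-- def non_allergic_ingredients(food_with_alergens, all_allergens, all_ingredients):
--     wanted = set(all_allergens)
--     full = set(all_ingredients)
--     candidates = {}
--     for ingredients, allergens in food_with_alergens:
--         for allergen in allergens:
--             if allergen in wanted:
--                 candidates[allergen] = candidates.get(allergen, full).intersection(ingredients)
--     allergic = set()
--     for allergen in all_allergens:
--         allergic |= candidates.get(allergen, full)
--     return full - allergic
-- ===== Notes on version B (the rewrite author's own statement) =====
-- stated objective: faster
-- what changed: B replaces A's per-allergen rescan of the whole food list by a single pass over the foods that incrementally intersects each listed allergen's candidate set in a dict, then unions the candidates and subtracts once.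
import Mathlib
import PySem

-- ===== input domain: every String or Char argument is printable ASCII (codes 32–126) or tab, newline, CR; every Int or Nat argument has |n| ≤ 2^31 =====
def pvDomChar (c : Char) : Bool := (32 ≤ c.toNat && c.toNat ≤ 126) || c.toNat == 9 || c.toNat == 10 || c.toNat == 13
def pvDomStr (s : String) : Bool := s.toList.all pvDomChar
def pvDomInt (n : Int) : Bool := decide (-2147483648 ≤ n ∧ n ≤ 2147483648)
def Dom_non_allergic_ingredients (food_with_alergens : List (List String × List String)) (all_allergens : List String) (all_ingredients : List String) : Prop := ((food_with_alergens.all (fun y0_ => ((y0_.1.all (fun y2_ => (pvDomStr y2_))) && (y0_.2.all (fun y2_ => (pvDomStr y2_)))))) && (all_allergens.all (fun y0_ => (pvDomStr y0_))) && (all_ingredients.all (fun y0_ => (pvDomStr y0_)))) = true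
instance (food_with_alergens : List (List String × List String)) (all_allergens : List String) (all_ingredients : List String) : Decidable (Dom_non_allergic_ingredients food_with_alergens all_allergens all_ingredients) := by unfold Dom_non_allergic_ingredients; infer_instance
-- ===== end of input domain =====

-- B replaces A's per-allergen rescans of the whole food list by one pass over the
-- foods that intersects each listed allergen's candidate set incrementally (objective: faster).

-- ===== PORT A =====
-- the foods' ingredient/allergen collections are Python sets: ported as lists of their
-- elements; 'candidates &= ingredients' is PySem.Set.inter (exact: membership only is used)
def non_allergic_ingredients (food_with_alergens : List (List String × List String)) (all_allergens : List String) (all_ingredients : List String) : List String :=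
  let allergic_ingredients : PySem.Dict String (PySem.Set String) :=
    all_allergens.foldl (fun d allergen =>
      let candidates : PySem.Set String :=
        food_with_alergens.foldl (fun c p =>
          if allergen ∈ p.2 then PySem.Set.inter c p.1 else c)
          (PySem.Set.ofList all_ingredients)
      d.insert allergen candidates) PySem.Dict.empty
  allergic_ingredients.items.foldl (fun s p => PySem.Set.diff s p.2)
    (PySem.Set.ofList all_ingredients)

-- ===== PORT B =====
def non_allergic_ingredients_alt (food_with_alergens : List (List String × List String)) (all_allergens : List String) (all_ingredients : List String) : List String :=
  let wanted : PySem.Set String := PySem.Set.ofList all_allergens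
  let full : PySem.Set String := PySem.Set.ofList all_ingredients
  let candidates : PySem.Dict String (PySem.Set String) :=
    food_with_alergens.foldl (fun d p =>
      p.2.foldl (fun d allergen =>
        if PySem.Set.contains wanted allergen then
          d.modify allergen full (fun c => PySem.Set.inter c p.1)
        else d) d) PySem.Dict.empty
  let allergic : PySem.Set String :=
    all_allergens.foldl
      (fun s a => PySem.Set.union s (candidates.getD a full))
      PySem.Set.empty
  PySem.Set.diff full allergic

-- ===== PRECONDITION & SPEC =====
def Spec_non_allergic_ingredients (food_with_alergens : List (List String × List String)) (all_allergens : List String) (all_ingredients : List String) (out : List String) : Prop := out = non_allergic_ingredients_alt food_with_alergens all_allergens all_ingredients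
instance (food_with_alergens : List (List String × List String)) (all_allergens : List String) (all_ingredients : List String) (out : List String) : Decidable (Spec_non_allergic_ingredients food_with_alergens all_allergens all_ingredients out) := by unfold Spec_non_allergic_ingredients; infer_instance

-- ===== CLAIM (what is proved, stated in full; the proofs are below) =====
def Claim_equal_non_allergic_ingredients : Prop := ∀ (food_with_alergens : List (List String × List String)) (all_allergens : List String) (all_ingredients : List String), Dom_non_allergic_ingredients food_with_alergens all_allergens all_ingredients → Spec_non_allergic_ingredients food_with_alergens all_allergens all_ingredients (non_allergic_ingredients food_with_alergens all_allergens all_ingredients)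

-- ===== LEMMAS AND PROOFS =====

-- set difference is a filter of its left argument (definitional)
theorem pvDiff_filter (s t : PySem.Set String) :
    PySem.Set.diff s t = s.filter (fun x => !(PySem.Set.contains t x)) := rfl

-- A's final loop, subtracting every dict value, is one filter of the ingredient set
theorem pvFoldDiff (l : List (String × PySem.Set String)) (s : PySem.Set String) :
    l.foldl (fun s q => PySem.Set.diff s q.2) s =
      s.filter (fun x => l.all (fun q => !(PySem.Set.contains q.2 x))) := by
  induction l generalizing s with
  | nil => simp
  | cons q l ih =>
      rw [List.foldl_cons, ih, pvDiff_filter, List.filter_filter]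
      apply List.filter_congr
      intro x _
      simp only [List.all_cons]
      cases PySem.Set.contains q.2 x <;> simp

-- membership in an intersection
theorem pvMem_inter (s t : PySem.Set String) (x : String) :
    x ∈ PySem.Set.inter s t ↔ x ∈ s ∧ x ∈ t := by
  show x ∈ s.filter (fun y => PySem.Set.contains t y) ↔ _
  simp [List.mem_filter, PySem.Set.contains]

-- membership in A's per-allergen candidates fold
theorem pvA_cand_mem (fw : List (List String × List String)) (a x : String)
    (s : PySem.Set String) :
    x ∈ fw.foldl (fun c p => if a ∈ p.2 then PySem.Set.inter c p.1 else c) s ↔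
      x ∈ s ∧ ∀ p ∈ fw, a ∈ p.2 → x ∈ p.1 := by
  induction fw generalizing s with
  | nil => simp
  | cons p fw ih =>
      simp only [List.foldl_cons]
      by_cases hp : a ∈ p.2
      · rw [if_pos hp, ih, pvMem_inter]
        simp only [List.mem_cons]
        constructor
        · rintro ⟨⟨h1, h2⟩, h3⟩
          refine ⟨h1, fun q hq ha => ?_⟩
          rcases hq with rfl | hq
          · exact h2
          · exact h3 q hq ha
        · rintro ⟨h1, h2⟩
          exact ⟨⟨h1, h2 p (Or.inl rfl) hp⟩, fun q hq ha => h2 q (Or.inr hq) ha⟩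
      · rw [if_neg hp, ih]
        simp only [List.mem_cons]
        constructor
        · rintro ⟨h1, h2⟩
          refine ⟨h1, fun q hq ha => ?_⟩
          rcases hq with rfl | hq
          · exact absurd ha hp
          · exact h2 q hq ha
        · rintro ⟨h1, h2⟩
          exact ⟨h1, fun q hq ha => h2 q (Or.inr hq) ha⟩

-- every item of A's dict pairs an allergen of the list with its candidates value
theorem pvA_items_shape (alls : List String) (f : String → PySem.Set String)
    (d : PySem.Dict String (PySem.Set String)) :
    ∀ q ∈ (alls.foldl (fun d a => d.insert a (f a)) d).items,
      q ∈ d.items ∨ (q.1 ∈ alls ∧ q.2 = f q.1) := by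
  induction alls generalizing d with
  | nil => exact fun q hq => Or.inl hq
  | cons a alls ih =>
      simp only [List.foldl_cons]
      intro q hq
      rcases ih _ q hq with h | h
      · rcases (PySem.Dict.mem_items_insert _ _ _ _).1 h with h | h
        · subst h; exact Or.inr ⟨List.mem_cons_self, rfl⟩
        · exact Or.inl h.1
      · exact Or.inr ⟨List.mem_cons_of_mem _ h.1, h.2⟩

-- keys outside the fold are untouched
theorem pvA_get?_untouched (alls : List String) (f : String → PySem.Set String)
    (d : PySem.Dict String (PySem.Set String)) (a : String) (ha : a ∉ alls) :
    (alls.foldl (fun d b => d.insert b (f b)) d).get? a = d.get? a := by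
  induction alls generalizing d with
  | nil => rfl
  | cons b alls ih =>
      simp only [List.foldl_cons]
      rw [ih _ fun h => ha (List.mem_cons_of_mem _ h),
        PySem.Dict.get?_insert_of_ne _ _ (show a ≠ b from fun h => ha (by rw [h]; exact List.mem_cons_self))]

-- every allergen of the list ends up mapped to its candidates value
theorem pvA_get?_mem (alls : List String) (f : String → PySem.Set String)
    (d : PySem.Dict String (PySem.Set String)) (a : String) (ha : a ∈ alls) :
    (alls.foldl (fun d b => d.insert b (f b)) d).get? a = some (f a) := by
  induction alls generalizing d with
  | nil => cases ha
  | cons b alls ih =>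
      simp only [List.foldl_cons]
      by_cases h : a ∈ alls
      · exact ih _ h
      · have hab : a = b := by
          rcases List.mem_cons.1 ha with rfl | ha
          · rfl
          · exact absurd ha h
        subst hab
        rw [pvA_get?_untouched alls f _ a h, PySem.Dict.get?_insert_self]

-- a successful lookup exhibits an item of the dict
theorem pvGet?_mem_items (d : PySem.Dict String (PySem.Set String)) (k : String)
    (v : PySem.Set String) (h : d.get? k = some v) : (k, v) ∈ d.items := by
  unfold PySem.Dict.get? at h
  cases hf : List.find? (fun p => p.1 == k) d.items with
  | none => rw [hf] at h; cases h
  | some q =>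
      rw [hf] at h
      have hq : q ∈ d.items := List.mem_of_find?_eq_some hf
      have hpq := List.find?_some hf
      simp only [] at hpq
      have hk : q.1 = k := eq_of_beq hpq
      have hv : q.2 = v := by simpa using h
      have : (k, v) = q := by rw [← hk, ← hv]
      rwa [this]

-- membership in B's allergic union
theorem pvB_union_mem (alls : List String) (g : String → PySem.Set String)
    (s : PySem.Set String) (x : String) :
    x ∈ alls.foldl (fun s a => PySem.Set.union s (g a)) s ↔
      x ∈ s ∨ ∃ a ∈ alls, x ∈ g a := by
  induction alls generalizing s with
  | nil => simp
  | cons a alls ih =>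
      simp only [List.foldl_cons, ih]
      rw [show PySem.Set.union s (g a) = PySem.Set.update s (g a) from rfl,
        PySem.Set.mem_update]
      constructor
      · rintro ((h | h) | ⟨b, hb, hx⟩)
        · exact Or.inl h
        · exact Or.inr ⟨a, List.mem_cons_self, h⟩
        · exact Or.inr ⟨b, List.mem_cons_of_mem _ hb, hx⟩
      · rintro (h | ⟨b, hb, hx⟩)
        · exact Or.inl (Or.inl h)
        · rcases List.mem_cons.1 hb with rfl | hb
          · exact Or.inl (Or.inr hx)
          · exact Or.inr ⟨b, hb, hx⟩

-- effect of one food's inner loop on the candidate set of an allergen of interest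
theorem pvB_inner_getD (bs : List String) (alls : List String)
    (ing : List String) (c : PySem.Set String)
    (d : PySem.Dict String (PySem.Set String)) (a x : String) (ha : a ∈ alls) :
    (x ∈ (bs.foldl (fun d allergen =>
        if PySem.Set.contains (PySem.Set.ofList alls) allergen then
          d.modify allergen c (fun c' => PySem.Set.inter c' ing)
        else d) d).getD a c ↔
      x ∈ d.getD a c ∧ (a ∈ bs → x ∈ ing)) := by
  induction bs generalizing d with
  | nil => simp
  | cons b bs ih =>
      simp only [List.foldl_cons]
      by_cases hw : PySem.Set.contains (PySem.Set.ofList alls) b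
      · rw [if_pos hw]
        by_cases hab : a = b
        · subst hab
          rw [ih _, PySem.Dict.getD_modify_self, pvMem_inter]
          constructor
          · rintro ⟨⟨h1, h2⟩, _⟩
            exact ⟨h1, fun _ => h2⟩
          · rintro ⟨h1, h2⟩
            exact ⟨⟨h1, h2 (List.mem_cons_self)⟩, fun _ => h2 (List.mem_cons_self)⟩
        · rw [ih _, PySem.Dict.getD_modify_of_ne _ _ _ hab]
          constructor
          · rintro ⟨h1, h2⟩
            refine ⟨h1, fun hm => ?_⟩
            rcases List.mem_cons.1 hm with rfl | hm
            · exact absurd rfl hab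
            · exact h2 hm
          · rintro ⟨h1, h2⟩
            exact ⟨h1, fun hm => h2 (List.mem_cons_of_mem _ hm)⟩
      · rw [if_neg hw]
        have hab : a ≠ b := by
          rintro rfl
          exact hw (by
            rw [PySem.Set.contains_iff, PySem.Set.mem_ofList]
            exact ha)
        rw [ih _]
        constructor
        · rintro ⟨h1, h2⟩
          refine ⟨h1, fun hm => ?_⟩
          rcases List.mem_cons.1 hm with rfl | hm
          · exact absurd rfl hab
          · exact h2 hm
        · rintro ⟨h1, h2⟩
          exact ⟨h1, fun hm => h2 (List.mem_cons_of_mem _ hm)⟩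

-- membership in B's incrementally built candidate set of an allergen of interest
theorem pvB_getD_mem (fw : List (List String × List String)) (alls : List String)
    (c : PySem.Set String) (d : PySem.Dict String (PySem.Set String))
    (a x : String) (ha : a ∈ alls) :
    (x ∈ (fw.foldl (fun d p =>
        p.2.foldl (fun d allergen =>
          if PySem.Set.contains (PySem.Set.ofList alls) allergen then
            d.modify allergen c (fun c' => PySem.Set.inter c' p.1)
          else d) d) d).getD a c ↔
      x ∈ d.getD a c ∧ ∀ p ∈ fw, a ∈ p.2 → x ∈ p.1) := by
  induction fw generalizing d with
  | nil => simp
  | cons p fw ih =>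
      simp only [List.foldl_cons]
      rw [ih _, pvB_inner_getD _ _ _ _ _ _ _ ha]
      constructor
      · rintro ⟨⟨h1, h2⟩, h3⟩
        refine ⟨h1, fun q hq hm => ?_⟩
        rcases List.mem_cons.1 hq with rfl | hq
        · exact h2 hm
        · exact h3 q hq hm
      · rintro ⟨h1, h2⟩
        exact ⟨⟨h1, fun hm => h2 p (List.mem_cons_self) hm⟩,
          fun q hq hm => h2 q (List.mem_cons_of_mem _ hq) hm⟩

-- a set's containment test, read as a Prop
theorem pvContains_false (s : PySem.Set String) (x : String) :
    (PySem.Set.contains s x = false) ↔ x ∉ s := by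
  rw [Bool.eq_false_iff]
  exact not_congr (PySem.Set.contains_iff _ _)

-- ===== VERDICT (by name: the statement is the Claim_ definition above) =====
theorem non_allergic_ingredients_spec : Claim_equal_non_allergic_ingredients := by
  intro fw alls ings _
  unfold Spec_non_allergic_ingredients
  unfold non_allergic_ingredients non_allergic_ingredients_alt
  simp only []
  rw [pvFoldDiff, pvDiff_filter]
  apply List.filter_congr
  intro x hx
  rw [Bool.eq_iff_iff]
  simp only [List.all_eq_true, Bool.not_eq_true', pvContains_false]
  constructor
  · intro h hmem
    rw [pvB_union_mem] at hmem
    rcases hmem with hm | ⟨a, ha, hxa⟩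
    · cases hm
    · rw [pvB_getD_mem fw alls _ PySem.Dict.empty a x ha, PySem.Dict.getD_empty] at hxa
      exact h _ (pvGet?_mem_items _ a _ (pvA_get?_mem alls _ PySem.Dict.empty a ha))
        ((pvA_cand_mem fw a x _).2 hxa)
  · intro h q hq hxq
    have hshape := (pvA_items_shape alls _ PySem.Dict.empty q hq).resolve_left
      (by simp [PySem.Dict.empty])
    rw [hshape.2, pvA_cand_mem] at hxq
    refine h ?_
    rw [pvB_union_mem]
    refine Or.inr ⟨q.1, hshape.1, ?_⟩
    rw [pvB_getD_mem fw alls _ PySem.Dict.empty q.1 x hshape.1, PySem.Dict.getD_empty]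
    exact hxq
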